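-- pv_equiv track=rewrite | github.com/pypi-data/pypi-mirror-124 | packages/upygrade/upygrade-0.0.4.tar.gz/upygrade-0.0.4/src/upygrade/gurobi.py | str_to_lp
-- ===== SOURCE A (Python) =====
-- def str_to_lp(text):
--     """
--     Converts an lp solve string into a gurobipy model.
--     """
--     def ident(string):
--         return " " + string
--
--     new_lines = []
--     count = 0
--
--     obj = {
--         'max': 'Maximize',
--         'min': 'Minimize'
--     }
--     for line in text.splitlines():
--
--         line = line.strip()
--         if len(line) > 0 and line[-1] == ';':
--
--             line = line[:-1]
--
--             if count == 0:
--                 lhs, rhs = line.split(':')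
--                 new_lines.append(obj[lhs.lower()])
--                 new_lines.append(ident(rhs))
--                 new_lines.append('Subject To')
--             else:
--                 if line.startswith('int '):
--                     new_lines.append('Integer')
--                     new_lines.append(ident(" ".join(line.split()[1:])))
--                 else:
--                     new_lines.append(ident(line))
--
--             count += 1
--
--     new_lines.append('End')
--     return new_lines
-- ===== SOURCE B (Python) =====
-- def str_to_lp(text):
--     """
--     Converts an lp solve string into a gurobipy model.
--     """
--     obj = {'max': 'Maximize', 'min': 'Minimize'}
--     kept = []
--     for raw in text.splitlines():
--         s = raw.strip()
--         if s.endswith(';'):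
--             kept.append(s[:-1])
--     if not kept:
--         return ['End']
--     lhs, rhs = kept[0].split(':')
--     body = [seg
--             for line in kept[1:]
--             for seg in (['Integer', ' ' + ' '.join(line.split()[1:])]
--                         if line.startswith('int ') else [' ' + line])]
--     return [obj[lhs.lower()], ' ' + rhs, 'Subject To', *body, 'End']
-- ===== Notes on version B (the rewrite author's own statement) =====
-- stated objective: alternative
-- what changed: A's single loop with a mutable count deciding objective-vs-constraint per line is replaced by a filter pass that collects the ';'-terminated statements, then head/tail processing: the head parsed as the objective and the tail flatMapped into constraint segments.
import Mathlib
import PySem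

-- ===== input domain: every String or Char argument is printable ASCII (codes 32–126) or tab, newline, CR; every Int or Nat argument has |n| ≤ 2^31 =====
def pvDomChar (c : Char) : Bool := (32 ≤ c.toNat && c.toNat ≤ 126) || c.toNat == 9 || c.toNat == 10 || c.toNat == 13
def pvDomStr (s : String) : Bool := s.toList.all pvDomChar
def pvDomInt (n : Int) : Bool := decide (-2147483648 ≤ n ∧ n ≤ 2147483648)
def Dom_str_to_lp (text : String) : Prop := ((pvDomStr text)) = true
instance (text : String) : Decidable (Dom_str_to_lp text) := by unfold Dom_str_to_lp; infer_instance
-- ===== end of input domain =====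

-- B re-decomposes A's single counter-driven loop into filter-the-statements, then head (objective) + flatMap over the tail (constraints); same values, 'alternative' objective.

-- ===== PORT A =====
-- the `obj` dict of A (shared literal constant)
def lpObj : PySem.Dict (List Char) (List Char) :=
  ((PySem.Dict.empty).insert "max".toList "Maximize".toList).insert "min".toList "Minimize".toList

-- A's inner helper `ident`
def lpIdent (s : List Char) : List Char := ' ' :: s

-- A's loop body over (new_lines, count); where Python raises (ValueError on unpacking,
-- KeyError on the obj lookup) the state is returned unchanged — those inputs are outside Pre_.
def lpStepA (st : List (List Char) × Nat) (raw : List Char) : List (List Char) × Nat :=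
  let line := PySem.Chars.strip raw
  if 0 < line.length ∧ PySem.List.pyGet? line (-1) = some ';' then
    let l := PySem.List.slice line none (some (-1))
    if st.2 = 0 then
      match PySem.Chars.splitOn l [':'] with
      | [lhs, rhs] =>
        match lpObj.get? (PySem.Chars.lower lhs) with
        | some w => (st.1 ++ [w, lpIdent rhs, "Subject To".toList], st.2 + 1)
        | none => (st.1, st.2 + 1)    -- Python: KeyError here (excluded by Pre_)
      | _ => (st.1, st.2 + 1)         -- Python: ValueError here (excluded by Pre_)
    else
      if PySem.Chars.startswith l "int ".toList then
        (st.1 ++ ["Integer".toList,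
                  lpIdent (PySem.Chars.join [' '] (PySem.List.slice (PySem.Chars.split₀ l) (some 1) none))], st.2 + 1)
      else
        (st.1 ++ [lpIdent l], st.2 + 1)
  else st

def str_to_lp (text : String) : List String :=
  let r := (PySem.Chars.splitlines text.toList).foldl lpStepA ([], 0)
  (r.1 ++ ["End".toList]).map (fun cs => String.mk cs)

-- ===== PORT B =====
-- B's first pass: keep stripped lines ending in ';', with the ';' removed
def lpKeepStep (acc : List (List Char)) (raw : List Char) : List (List Char) :=
  let s := PySem.Chars.strip raw
  if PySem.Chars.endswith s [';'] then acc ++ [PySem.List.slice s none (some (-1))] else acc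

-- B's per-constraint segment list
def lpSegs (line : List Char) : List (List Char) :=
  if PySem.Chars.startswith line "int ".toList then
    ["Integer".toList, ' ' :: PySem.Chars.join [' '] (PySem.List.slice (PySem.Chars.split₀ line) (some 1) none)]
  else [' ' :: line]

def str_to_lp_alt (text : String) : List String :=
  match (PySem.Chars.splitlines text.toList).foldl lpKeepStep [] with
  | [] => ["End"]
  | head :: rest =>
    match PySem.Chars.splitOn head [':'] with
    | [lhs, rhs] =>
      match lpObj.get? (PySem.Chars.lower lhs) with
      | some w =>
        ((w :: (' ' :: rhs) :: "Subject To".toList :: rest.flatMap lpSegs) ++ ["End".toList]).map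
          (fun cs => String.mk cs)
      | none => []     -- Python B: KeyError here (excluded by Pre_)
    | _ => []          -- Python B: ValueError here (excluded by Pre_)

-- ===== PRECONDITION & SPEC =====
-- the statements of the input: stripped lines ending in ';', with the ';' removed
def pvKept (text : String) : List (List Char) :=
  ((PySem.Chars.splitlines text.toList).filter
      (fun raw => PySem.Chars.endswith (PySem.Chars.strip raw) [';'])).map
    (fun raw => PySem.List.slice (PySem.Chars.strip raw) none (some (-1)))

-- Pre_ excludes exactly the inputs on which A raises: a first statement whose ':'-split is not
-- a pair (ValueError) or whose left side is not 'max'/'min' up to case (KeyError).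
def Pre_str_to_lp (text : String) : Prop :=
  pvKept text = [] ∨
    ((PySem.Chars.splitOn ((pvKept text).headD []) [':']).length = 2 ∧
     (PySem.Chars.lower ((PySem.Chars.splitOn ((pvKept text).headD []) [':']).headD []) = "max".toList ∨
      PySem.Chars.lower ((PySem.Chars.splitOn ((pvKept text).headD []) [':']).headD []) = "min".toList))
instance (text : String) : Decidable (Pre_str_to_lp text) := by unfold Pre_str_to_lp; infer_instance

def pvWitness_str_to_lp : String := "max: x + y;\nc1: x <= 1;\nint x;"

def Spec_str_to_lp (text : String) (out : List String) : Prop := out = str_to_lp_alt text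
instance (text : String) (out : List String) : Decidable (Spec_str_to_lp text out) := by unfold Spec_str_to_lp; infer_instance

-- ===== CLAIM (what is proved, stated in full; the proofs are below) =====
def Claim_equal_str_to_lp : Prop := ∀ (text : String), Dom_str_to_lp text → Pre_str_to_lp text → Spec_str_to_lp text (str_to_lp text)

-- ===== LEMMAS AND PROOFS =====

-- A's kept-line test equals B's endswith test
lemma lp_keep_iff (s : List Char) :
    (0 < s.length ∧ PySem.List.pyGet? s (-1) = some ';') ↔ PySem.Chars.endswith s [';'] = true := by
  rw [PySem.List.pyGet?_neg_one, PySem.Chars.endswith_iff]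
  constructor
  · rintro ⟨-, h⟩
    rcases List.eq_nil_or_concat s with rfl | ⟨t, x, rfl⟩
    · simp at h
    · simp at h; subst h; exact ⟨t, by simp⟩
  · rintro ⟨t, rfl⟩
    constructor
    · simp
    · simp

-- the part of A's loop body that runs on a kept (stripped, de-';'-ed) line
def lpStepK (st : List (List Char) × Nat) (l : List Char) : List (List Char) × Nat :=
  if st.2 = 0 then
    match PySem.Chars.splitOn l [':'] with
    | [lhs, rhs] =>
      match lpObj.get? (PySem.Chars.lower lhs) with
      | some w => (st.1 ++ [w, lpIdent rhs, "Subject To".toList], st.2 + 1)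
      | none => (st.1, st.2 + 1)
    | _ => (st.1, st.2 + 1)
  else
    if PySem.Chars.startswith l "int ".toList then
      (st.1 ++ ["Integer".toList,
                lpIdent (PySem.Chars.join [' '] (PySem.List.slice (PySem.Chars.split₀ l) (some 1) none))], st.2 + 1)
    else
      (st.1 ++ [lpIdent l], st.2 + 1)

lemma lpStepA_eq (st : List (List Char) × Nat) (raw : List Char) :
    lpStepA st raw =
      if PySem.Chars.endswith (PySem.Chars.strip raw) [';'] then
        lpStepK st (PySem.List.slice (PySem.Chars.strip raw) none (some (-1)))
      else st := by
  unfold lpStepA lpStepK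
  by_cases h : PySem.Chars.endswith (PySem.Chars.strip raw) [';'] = true
  · rw [if_pos ((lp_keep_iff _).mpr h), if_pos h]
  · rw [if_neg (fun hc => h ((lp_keep_iff _).mp hc)), if_neg h]

-- A's fold visits exactly the kept lines
lemma foldA_eq_foldK (ls : List (List Char)) (st : List (List Char) × Nat) :
    ls.foldl lpStepA st =
      (((ls.filter (fun raw => PySem.Chars.endswith (PySem.Chars.strip raw) [';'])).map
          (fun raw => PySem.List.slice (PySem.Chars.strip raw) none (some (-1))))).foldl lpStepK st := by
  induction ls generalizing st with
  | nil => rfl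
  | cons r t ih =>
    simp only [List.foldl_cons, lpStepA_eq, List.filter_cons]
    by_cases h : PySem.Chars.endswith (PySem.Chars.strip r) [';'] = true
    · simp [h, ih]
    · simp [h, ih]

-- B's first pass builds the same kept list
lemma foldB_eq_kept (ls : List (List Char)) (acc : List (List Char)) :
    ls.foldl lpKeepStep acc =
      acc ++ ((ls.filter (fun raw => PySem.Chars.endswith (PySem.Chars.strip raw) [';'])).map
          (fun raw => PySem.List.slice (PySem.Chars.strip raw) none (some (-1)))) := by
  have := PySem.List.foldl_append_if
      (fun raw => PySem.Chars.endswith (PySem.Chars.strip raw) [';'])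
      (fun raw => PySem.List.slice (PySem.Chars.strip raw) none (some (-1))) ls acc
  simpa [lpKeepStep] using this

-- once count ≠ 0, A's loop appends B's constraint segments
lemma foldK_tail (rest : List (List Char)) (acc : List (List Char)) (n : Nat) (hn : n ≠ 0) :
    rest.foldl lpStepK (acc, n) = (acc ++ rest.flatMap lpSegs, n + rest.length) := by
  induction rest generalizing acc n with
  | nil => simp
  | cons l t ih =>
    have hstep : lpStepK (acc, n) l = (acc ++ lpSegs l, n + 1) := by
      unfold lpStepK lpSegs lpIdent
      simp only [if_neg hn]
      split <;> rfl
    rw [List.foldl_cons, hstep, ih _ _ (by omega)]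
    simp [List.flatMap_cons, List.append_assoc, Prod.ext_iff]
    omega

lemma splitOn_pair (l : List Char) (h : (PySem.Chars.splitOn l [':']).length = 2) :
    ∃ a b, PySem.Chars.splitOn l [':'] = [a, b] := by
  match hx : PySem.Chars.splitOn l [':'] with
  | [a, b] => exact ⟨a, b, rfl⟩
  | [] => simp [hx] at h
  | [a] => simp [hx] at h
  | a :: b :: c :: t => simp [hx] at h

-- ===== VERDICT (by name: the statement is the Claim_ definition above) =====
theorem str_to_lp_spec : Claim_equal_str_to_lp := by
  intro text _hdom hpre
  unfold Spec_str_to_lp str_to_lp str_to_lp_alt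
  rw [foldA_eq_foldK, foldB_eq_kept]
  have hk : ((PySem.Chars.splitlines text.toList).filter
        (fun raw => PySem.Chars.endswith (PySem.Chars.strip raw) [';'])).map
      (fun raw => PySem.List.slice (PySem.Chars.strip raw) none (some (-1))) = pvKept text := rfl
  rw [hk, List.nil_append]
  unfold Pre_str_to_lp at hpre
  match hkept : pvKept text with
  | [] => rfl
  | head :: rest =>
    rw [hkept] at hpre
    rcases hpre with hpre | ⟨hlen, hlow⟩
    · exact absurd hpre (by simp)
    · simp only [List.headD_cons] at hlen hlow
      obtain ⟨lhs, rhs, hsplit⟩ := splitOn_pair head hlen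
      rw [hsplit] at hlow
      simp only [List.headD_cons] at hlow
      rcases hlow with h | h
      · have hget : lpObj.get? ("max".toList) = some "Maximize".toList := by rfl
        have hfirst : lpStepK (([] : List (List Char)), 0) head =
            (["Maximize".toList, lpIdent rhs, "Subject To".toList], 1) := by
          unfold lpStepK
          rw [if_pos rfl, hsplit]
          simp [h]
          rfl
        have hfold : List.foldl lpStepK (([] : List (List Char)), 0) (head :: rest) =
            (["Maximize".toList, lpIdent rhs, "Subject To".toList] ++ rest.flatMap lpSegs,
              1 + rest.length) := by
          rw [List.foldl_cons, hfirst, foldK_tail rest _ 1 one_ne_zero]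
        simp only [hfold, hsplit, h, hget, lpIdent]
        simp
      · have hget : lpObj.get? ("min".toList) = some "Minimize".toList := by rfl
        have hfirst : lpStepK (([] : List (List Char)), 0) head =
            (["Minimize".toList, lpIdent rhs, "Subject To".toList], 1) := by
          unfold lpStepK
          rw [if_pos rfl, hsplit]
          simp [h]
          rfl
        have hfold : List.foldl lpStepK (([] : List (List Char)), 0) (head :: rest) =
            (["Minimize".toList, lpIdent rhs, "Subject To".toList] ++ rest.flatMap lpSegs,
              1 + rest.length) := by
          rw [List.foldl_cons, hfirst, foldK_tail rest _ 1 one_ne_zero]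
        simp only [hfold, hsplit, h, hget, lpIdent]
        simp
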